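-- pv_equiv track=rewrite | github.com/thealper2/codewars-solutions | 7-kyu/simple_string_reversal.py | solve
-- ===== SOURCE A (Python) =====
-- def solve(s):
--     chars = [c for c in s if c != ' ']
--     chars.reverse()
--     result = []
--     index = 0
--
--     for c in s:
--         if c == ' ':
--             result.append(' ')
--         else:
--             result.append(chars[index])
--             index += 1
--
--     return ''.join(result)
-- ===== SOURCE B (Python) =====
-- def solve(s):
--     a = list(s)
--     i, j = 0, len(a) - 1
--     while i < j:
--         if a[i] == ' ':
--             i += 1
--         elif a[j] == ' ':
--             j -= 1
--         else:
--             a[i], a[j] = a[j], a[i]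
--             i += 1
--             j -= 1
--     return ''.join(a)
-- ===== Notes on version B (the rewrite author's own statement) =====
-- stated objective: alternative
-- what changed: Replaces A's filter-reverse-then-reindex three-pass construction by an in-place two-pointer swap over both ends at once, skipping spaces on each side.
import Mathlib
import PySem

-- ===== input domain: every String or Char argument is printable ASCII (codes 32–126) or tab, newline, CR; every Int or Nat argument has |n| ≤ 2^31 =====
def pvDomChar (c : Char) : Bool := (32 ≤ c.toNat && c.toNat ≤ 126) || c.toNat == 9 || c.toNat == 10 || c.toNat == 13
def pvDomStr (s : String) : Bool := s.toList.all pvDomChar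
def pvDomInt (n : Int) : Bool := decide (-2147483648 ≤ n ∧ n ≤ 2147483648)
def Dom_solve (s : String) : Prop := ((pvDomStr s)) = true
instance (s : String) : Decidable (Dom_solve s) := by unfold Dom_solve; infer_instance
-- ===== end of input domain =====

-- Reverse the non-space characters of s, spaces stay in place.
-- B replaces A's filter+reverse+reindex passes by an in-place two-pointer swap
-- over both ends at once (objective: alternative; same asymptotic cost).


-- ===== PORT A =====
-- the for-loop of A, with its (result, index) state; chars[index] is always in
-- range for any input (index counts non-spaces seen, chars holds all of them),
-- so getD is exact here
def solveLoopA (chars : List Char) : List Char → Nat → List Char → List Char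
  | [], _, res => res
  | c :: t, idx, res =>
    if c = ' ' then solveLoopA chars t idx (res ++ [' '])
    else solveLoopA chars t (idx + 1) (res ++ [chars.getD idx ' '])

def solve (s : String) : String :=
  let chars := (s.toList.filter (fun c => c ≠ ' ')).reverse
  String.mk (solveLoopA chars s.toList 0 [])

-- ===== PORT B =====
-- the while-loop of B: two pointers i, j moving inwards, swapping non-spaces
def solveLoopB (a : List Char) (i j : Nat) : List Char :=
  if _h : i < j then
    if a.getD i ' ' = ' ' then solveLoopB a (i + 1) j
    else if a.getD j ' ' = ' ' then solveLoopB a i (j - 1)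
    else solveLoopB ((a.set i (a.getD j ' ')).set j (a.getD i ' ')) (i + 1) (j - 1)
  else a
termination_by j - i
decreasing_by all_goals omega

def solve_alt (s : String) : String :=
  String.mk (solveLoopB s.toList 0 (s.toList.length - 1))

-- ===== PRECONDITION & SPEC =====
def Spec_solve (s : String) (out : String) : Prop := out = solve_alt s
instance (s : String) (out : String) : Decidable (Spec_solve s out) := by unfold Spec_solve; infer_instance

-- ===== CLAIM (what is proved, stated in full; the proofs are below) =====
def Claim_equal_solve : Prop := ∀ (s : String), Dom_solve s → Spec_solve s (solve s)

-- ===== LEMMAS AND PROOFS =====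

-- A's fill pass, with the index replaced by the not-yet-consumed stream
def fillSp : List Char → List Char → List Char
  | [], _ => []
  | c :: t, cs => if c = ' ' then ' ' :: fillSp t cs else cs.headD ' ' :: fillSp t cs.tail

theorem fillSp_space (t cs : List Char) : fillSp (' ' :: t) cs = ' ' :: fillSp t cs := by
  simp [fillSp]

-- common characterisation: space-preserving reversal by two-ended recursion
def gRev : List Char → List Char
  | [] => []
  | c :: t =>
    if c = ' ' then ' ' :: gRev t
    else
      match h : t.getLast? with
      | none => [c]
      | some d =>
        if d = ' ' then gRev (c :: t.dropLast) ++ [' ']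
        else d :: (gRev t.dropLast ++ [c])
termination_by l => l.length
decreasing_by
  · simp
  · have ht : t ≠ [] := by intro he; simp [he] at h
    have h1 : 0 < t.length := List.length_pos_of_ne_nil ht
    have h2 := List.length_dropLast (xs := t)
    simp only [List.length_cons]
    omega
  · have ht : t ≠ [] := by intro he; simp [he] at h
    have h1 : 0 < t.length := List.length_pos_of_ne_nil ht
    have h2 := List.length_dropLast (xs := t)
    simp only [List.length_cons]
    omega

theorem gRev_nil : gRev [] = [] := by simp [gRev]

theorem gRev_space (t : List Char) : gRev (' ' :: t) = ' ' :: gRev t := by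
  simp [gRev]

theorem gRev_single (c : Char) (hc : c ≠ ' ') : gRev [c] = [c] := by
  simp [gRev, hc]

theorem gRev_single' (c : Char) : gRev [c] = [c] := by
  by_cases hc : c = ' '
  · subst hc; rw [gRev_space, gRev_nil]
  · exact gRev_single c hc

theorem gRev_last_space (c : Char) (m : List Char) (hc : c ≠ ' ') :
    gRev (c :: m ++ [' ']) = gRev (c :: m) ++ [' '] := by
  rw [show (c :: m ++ [' ']) = c :: (m ++ [' ']) from rfl]
  rw [gRev]
  simp only [hc, if_false]
  split
  · next heq => simp at heq
  · next d heq =>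
      rw [List.getLast?_concat] at heq
      injection heq with heq
      subst heq
      simp [List.dropLast_concat]

theorem gRev_both (c d : Char) (m : List Char) (hc : c ≠ ' ') (hd : d ≠ ' ') :
    gRev (c :: m ++ [d]) = d :: (gRev m ++ [c]) := by
  rw [show (c :: m ++ [d]) = c :: (m ++ [d]) from rfl]
  rw [gRev]
  simp only [hc, if_false]
  split
  · next heq => simp at heq
  · next d' heq =>
      rw [List.getLast?_concat] at heq
      injection heq with heq
      subst heq
      simp [hd, List.dropLast_concat]

theorem loopA_eq (chars : List Char) (l : List Char) (idx : Nat) (res : List Char) :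
    solveLoopA chars l idx res = res ++ fillSp l (chars.drop idx) := by
  induction l generalizing idx res with
  | nil => simp [solveLoopA, fillSp]
  | cons c t ih =>
    by_cases hc : c = ' '
    · simp [solveLoopA, fillSp, hc, ih]
    · simp only [solveLoopA, fillSp, hc, if_false, ih]
      have h1 : chars.getD idx ' ' = (chars.drop idx).headD ' ' := by
        simp [List.getD_eq_getElem?_getD, List.headD_eq_head?_getD, List.head?_drop]
      have h2 : chars.drop (idx + 1) = (chars.drop idx).tail := by
        rw [List.tail_drop]
      rw [h1, h2]
      simp

theorem fillSp_append_space (xs : List Char) : ∀ cs, fillSp (xs ++ [' ']) cs = fillSp xs cs ++ [' '] := by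
  induction xs with
  | nil => intro cs; simp [fillSp]
  | cons c t ih =>
    intro cs
    by_cases hc : c = ' ' <;> simp [fillSp, hc, ih]

theorem fillSp_last (m : List Char) (d : Char) (hd : d ≠ ' ') :
    ∀ cs c, cs.length = (m.filter (fun c => c ≠ ' ')).length →
      fillSp (m ++ [d]) (cs ++ [c]) = fillSp m cs ++ [c] := by
  induction m with
  | nil =>
    intro cs c hlen
    have : cs = [] := by simpa using List.length_eq_zero_iff.mp (by simpa using hlen)
    subst this
    simp [fillSp, hd]
  | cons x t ih =>
    intro cs c hlen
    by_cases hx : x = ' '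
    · simp only [List.cons_append, fillSp, hx, if_true]
      rw [ih _ c (by simpa [hx] using hlen)]
    · have hcs : cs ≠ [] := by
        intro he; subst he; simp [hx] at hlen
      obtain ⟨y, cs', rfl⟩ := List.exists_cons_of_ne_nil hcs
      simp only [List.cons_append, fillSp, hx, if_false, List.headD_cons, List.tail_cons]
      rw [ih cs' c (by simp [hx] at hlen ⊢; omega)]

theorem fillSp_eq_gRev : ∀ n (l : List Char), l.length ≤ n →
    fillSp l ((l.filter (fun c => c ≠ ' ')).reverse) = gRev l := by
  intro n
  induction n with
  | zero =>
    intro l hl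
    have : l = [] := List.length_eq_zero_iff.mp (by omega)
    subst this; simp [fillSp, gRev_nil]
  | succ n ih =>
    intro l hl
    match l with
    | [] => simp [fillSp, gRev_nil]
    | c :: t =>
      by_cases hc : c = ' '
      · subst hc
        have hf : List.filter (fun c => decide (c ≠ ' ')) (' ' :: t) =
            List.filter (fun c => decide (c ≠ ' ')) t := by simp
        rw [hf, fillSp_space, gRev_space, ih t (by simp at hl; omega)]
      · rcases h : t.getLast? with _ | d
        · have ht : t = [] := List.getLast?_eq_none_iff.mp h
          subst ht
          simp [fillSp, hc, gRev_single c hc]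
        · have ht : t ≠ [] := by intro he; simp [he] at h
          have ht0 : 0 < t.length := List.length_pos_of_ne_nil ht
          have hdl := List.length_dropLast (xs := t)
          have hdec : t = t.dropLast ++ [d] := by
            conv_lhs => rw [← List.dropLast_append_getLast? _ h]
          by_cases hdsp : d = ' '
          · subst hdsp
            have hrw : c :: t = (c :: t.dropLast) ++ [' '] := by
              rw [List.cons_append]; exact congrArg (List.cons c) hdec
            rw [hrw, fillSp_append_space]
            have hfil : ((c :: t.dropLast) ++ [' ']).filter (fun c => decide (c ≠ ' ')) =
                (c :: t.dropLast).filter (fun c => decide (c ≠ ' ')) := by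
              simp [List.filter_cons, List.filter_append, hc]
            rw [hfil]
            rw [ih (c :: t.dropLast) (by simp at hl ⊢; omega)]
            exact (gRev_last_space c t.dropLast hc).symm
          · have hrw : c :: t = c :: t.dropLast ++ [d] := by
              rw [List.cons_append]; exact congrArg (List.cons c) hdec
            rw [hrw]
            have hfil : (c :: t.dropLast ++ [d]).filter (fun c => decide (c ≠ ' ')) =
                c :: ((t.dropLast).filter (fun c => decide (c ≠ ' ')) ++ [d]) := by
              simp [List.filter_cons, hc, List.filter_append, hdsp]
            rw [hfil]
            have hrev : (c :: ((t.dropLast).filter (fun c => decide (c ≠ ' ')) ++ [d])).reverse =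
                (d :: ((t.dropLast).filter (fun c => decide (c ≠ ' '))).reverse) ++ [c] := by
              simp
            rw [hrev]
            rw [show fillSp (c :: t.dropLast ++ [d])
                  ((d :: ((t.dropLast).filter (fun c => decide (c ≠ ' '))).reverse) ++ [c])
                = d :: fillSp (t.dropLast ++ [d])
                    (((t.dropLast).filter (fun c => decide (c ≠ ' '))).reverse ++ [c]) by
              simp [fillSp, hc]]
            rw [fillSp_last t.dropLast d hdsp _ c (by simp)]
            rw [ih t.dropLast (by simp at hl ⊢; omega)]
            exact (gRev_both c d t.dropLast hc hdsp).symm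

-- (P ++ c :: R).set at index P.length replaces c
theorem set_at_length (P R : List Char) (c x : Char) :
    (P ++ c :: R).set P.length x = P ++ x :: R := by
  induction P with
  | nil => simp
  | cons p P ih => simp [List.set, ih]

theorem swap_decomp (P M Q : List Char) (c d : Char) :
    ((P ++ c :: (M ++ d :: Q)).set P.length d).set (P.length + 1 + M.length) c =
      (P ++ d :: M) ++ c :: Q := by
  rw [set_at_length]
  rw [show P ++ d :: (M ++ d :: Q) = (P ++ d :: M) ++ d :: Q by simp]
  rw [show P.length + 1 + M.length = (P ++ d :: M).length by simp; omega]
  rw [set_at_length]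

theorem take_len (X Y : List Char) (k : Nat) (hk : k = X.length) :
    (X ++ Y).take k = X := by
  subst hk; simp

theorem drop_len (X Y : List Char) (k : Nat) (hk : k = X.length) :
    (X ++ Y).drop k = Y := by
  subst hk; simp

theorem take_len_plus_one (M : List Char) (d : Char) (R : List Char) :
    (M ++ d :: R).take (M.length + 1) = M ++ [d] := by
  induction M with
  | nil => simp
  | cons m M ih => simpa [List.take_succ_cons] using ih

theorem loopB_eq_gRev : ∀ N (a : List Char) (i j : Nat), j - i ≤ N →
    j < a.length → i ≤ j + 1 →
    solveLoopB a i j = a.take i ++ gRev ((a.drop i).take (j + 1 - i)) ++ a.drop (j + 1) := by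
  intro N
  induction N with
  | zero =>
    intro a i j hN hj hij
    rw [solveLoopB]
    simp only [show ¬ i < j by omega, dif_neg, not_false_iff]
    rcases Nat.eq_or_lt_of_le hij with h | h
    · -- i = j + 1 : empty segment
      subst h
      simp [gRev_nil, List.take_append_drop]
    · -- i = j : singleton segment
      have hij' : i = j := by omega
      subst hij'
      have hseg : (a.drop i).take 1 = [a.getD i ' '] := by
        rw [List.drop_eq_getElem_cons hj, List.take_succ_cons, List.take_zero,
            List.getD_eq_getElem?_getD, List.getElem?_eq_getElem hj]
        rfl
      simp only [show i + 1 - i = 1 by omega, hseg, gRev_single']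
      rw [List.getD_eq_getElem?_getD, List.getElem?_eq_getElem hj]
      conv_lhs => rw [← List.take_append_drop i a, List.drop_eq_getElem_cons hj]
      simp
  | succ n ih =>
    intro a i j hN hj hij
    by_cases hlt : i < j
    case neg => exact ih a i j (by omega) hj hij
    rw [solveLoopB, dif_pos hlt]
    have hi : i < a.length := by omega
    have hgi : a.getD i ' ' = a[i] := by
      rw [List.getD_eq_getElem?_getD, List.getElem?_eq_getElem hi]; rfl
    have hgj : a.getD j ' ' = a[j] := by
      rw [List.getD_eq_getElem?_getD, List.getElem?_eq_getElem hj]; rfl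
    by_cases hsi : a.getD i ' ' = ' '
    · -- a[i] is a space: advance i
      rw [if_pos hsi]
      rw [ih a (i + 1) j (by omega) hj (by omega)]
      have h1 : a.take (i + 1) = a.take i ++ [a[i]] := by
        rw [List.take_succ, List.getElem?_eq_getElem hi]; rfl
      have h2 : (a.drop i).take (j + 1 - i) = a[i] :: (a.drop (i + 1)).take (j - i) := by
        rw [List.drop_eq_getElem_cons hi, show j + 1 - i = (j - i) + 1 by omega,
            List.take_succ_cons]
      rw [hgi] at hsi
      rw [h1, h2, hsi, gRev_space, show j + 1 - (i + 1) = j - i by omega]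
      simp
    · rw [if_neg hsi]
      rw [hgi] at hsi
      by_cases hsj : a.getD j ' ' = ' '
      · -- a[j] is a space: retreat j
        rw [if_pos hsj]
        rw [hgj] at hsj
        rw [ih a i (j - 1) (by omega) (by omega) (by omega)]
        rw [show (j - 1) + 1 = j by omega]
        have e2 : a.drop j = a[j] :: a.drop (j + 1) := List.drop_eq_getElem_cons hj
        have e1 : (a.drop i).take (j + 1 - i) = (a.drop i).take (j - i) ++ [a[j]] := by
          rw [show j + 1 - i = (j - i) + 1 by omega, List.take_succ]
          congr 1
          rw [List.getElem?_drop, show i + (j - i) = j by omega,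
              List.getElem?_eq_getElem hj]
          rfl
        have hseg' : (a.drop i).take (j - i) = a[i] :: (a.drop (i + 1)).take (j - 1 - i) := by
          rw [List.drop_eq_getElem_cons hi, show j - i = (j - 1 - i) + 1 by omega,
              List.take_succ_cons]
        rw [e2, e1, hseg', hsj, gRev_last_space a[i] _ hsi]
        simp
      · -- both non-spaces: swap and move both
        rw [if_neg hsj]
        rw [hgj] at hsj
        rw [hgi, hgj]
        have hj1 : 1 ≤ j := by omega
        -- decomposition of a around positions i and j
        have hMlen : ((a.drop (i + 1)).take (j - i - 1)).length = j - i - 1 := by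
          rw [List.length_take, List.length_drop]; omega
        have hPlen : (a.take i).length = i := by rw [List.length_take]; omega
        have h0 : a.drop i = a[i] :: a.drop (i + 1) := List.drop_eq_getElem_cons hi
        have h2 : a.drop j = a[j] :: a.drop (j + 1) := List.drop_eq_getElem_cons hj
        have h1 : a.drop (i + 1) =
            (a.drop (i + 1)).take (j - i - 1) ++ (a[j] :: a.drop (j + 1)) := by
          conv_lhs => rw [← List.take_append_drop (j - i - 1) (a.drop (i + 1))]
          rw [List.drop_drop, show i + 1 + (j - i - 1) = j by omega, h2]
        have hdecomp : a = a.take i ++ a[i] ::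
            ((a.drop (i + 1)).take (j - i - 1) ++ a[j] :: a.drop (j + 1)) := by
          conv_lhs => rw [← List.take_append_drop i a, h0, h1]
        -- the swapped list, in decomposed form
        have hswap : (a.set i a[j]).set j a[i] =
            (a.take i ++ a[j] :: (a.drop (i + 1)).take (j - i - 1)) ++
              a[i] :: a.drop (j + 1) := by
          have hs := swap_decomp (a.take i) ((a.drop (i + 1)).take (j - i - 1))
            (a.drop (j + 1)) a[i] a[j]
          rw [hPlen, hMlen, show i + 1 + (j - i - 1) = j by omega, ← hdecomp] at hs
          exact hs
        rw [hswap]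
        have hlen' : ((a.take i ++ a[j] :: (a.drop (i + 1)).take (j - i - 1)) ++
            a[i] :: a.drop (j + 1)).length = j + 1 + (a.drop (j + 1)).length := by
          simp [hPlen, hMlen]; omega
        rw [ih ((a.take i ++ a[j] :: (a.drop (i + 1)).take (j - i - 1)) ++
              a[i] :: a.drop (j + 1)) (i + 1) (j - 1) (by omega)
            (by rw [hlen']; omega) (by omega)]
        -- the four pieces of the recursive result
        have t1 : ((a.take i ++ a[j] :: (a.drop (i + 1)).take (j - i - 1)) ++
            a[i] :: a.drop (j + 1)).take (i + 1) = a.take i ++ [a[j]] := by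
          rw [show (a.take i ++ a[j] :: (a.drop (i + 1)).take (j - i - 1)) ++
                a[i] :: a.drop (j + 1)
              = (a.take i ++ [a[j]]) ++ ((a.drop (i + 1)).take (j - i - 1) ++
                a[i] :: a.drop (j + 1)) by simp]
          exact take_len _ _ _ (by simp [hPlen])
        have t2 : ((a.take i ++ a[j] :: (a.drop (i + 1)).take (j - i - 1)) ++
            a[i] :: a.drop (j + 1)).drop (i + 1) =
            (a.drop (i + 1)).take (j - i - 1) ++ a[i] :: a.drop (j + 1) := by
          rw [show (a.take i ++ a[j] :: (a.drop (i + 1)).take (j - i - 1)) ++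
                a[i] :: a.drop (j + 1)
              = (a.take i ++ [a[j]]) ++ ((a.drop (i + 1)).take (j - i - 1) ++
                a[i] :: a.drop (j + 1)) by simp]
          exact drop_len _ _ _ (by simp [hPlen])
        have t3 : ((a.drop (i + 1)).take (j - i - 1) ++ a[i] :: a.drop (j + 1)).take
            ((j - 1) + 1 - (i + 1)) = (a.drop (i + 1)).take (j - i - 1) := by
          rw [show (j - 1) + 1 - (i + 1) = j - i - 1 by omega]
          rw [show j - i - 1 = ((a.drop (i + 1)).take (j - i - 1)).length from hMlen.symm]
          simp
        have t4 : ((a.take i ++ a[j] :: (a.drop (i + 1)).take (j - i - 1)) ++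
            a[i] :: a.drop (j + 1)).drop ((j - 1) + 1) = a[i] :: a.drop (j + 1) := by
          exact drop_len _ _ _ (by simp [hPlen, hMlen]; omega)
        rw [t1, t2, t3, t4]
        -- the segment of a and its reversal
        have hstep := take_len_plus_one ((a.drop (i + 1)).take (j - i - 1)) a[j]
          (a.drop (j + 1))
        rw [← h1, hMlen, show j - i - 1 + 1 = j - i by omega] at hstep
        have hS : (a.drop i).take (j + 1 - i) =
            a[i] :: ((a.drop (i + 1)).take (j - i - 1) ++ [a[j]]) := by
          rw [h0, show j + 1 - i = (j - i) + 1 by omega, List.take_succ_cons, hstep]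
        rw [hS, show a[i] :: ((a.drop (i + 1)).take (j - i - 1) ++ [a[j]])
              = a[i] :: (a.drop (i + 1)).take (j - i - 1) ++ [a[j]] by simp,
            gRev_both _ _ _ hsi hsj]
        simp

theorem solve_eq (s : String) : solve s = solve_alt s := by
  simp only [solve, solve_alt]
  by_cases h0 : s.toList.length = 0
  · have he : s.toList = [] := List.length_eq_zero_iff.mp h0
    rw [he, solveLoopB]
    simp [solveLoopA]
  · rw [loopA_eq]
    simp only [List.drop_zero, List.nil_append]
    rw [fillSp_eq_gRev s.toList.length s.toList le_rfl]
    rw [loopB_eq_gRev s.toList.length s.toList 0 (s.toList.length - 1)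
        (by omega) (by omega) (by omega)]
    rw [show s.toList.length - 1 + 1 - 0 = s.toList.length by omega,
        show s.toList.length - 1 + 1 = s.toList.length by omega]
    simp only [List.take_zero, List.drop_zero, List.nil_append, List.take_length,
      List.drop_length, List.append_nil]

-- ===== VERDICT (by name: the statement is the Claim_ definition above) =====
theorem solve_spec : Claim_equal_solve := by
  intro s _
  unfold Spec_solve
  exact solve_eq s
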